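-- pv_equiv track=rewrite | github.com/theri6v/CodeSprintSolutions | GeekForGeek/Problem Of The Day/Better String.py | betterString
-- ===== SOURCE A (Python) =====
-- def betterString(str1, str2):
--     def countDistinctSubsequences(s):
--         last_occurrence = {}
--         dp = [0] * (len(s) + 1)
--         dp[0] = 1
--
--         for i in range(1, len(dp)):
--             dp[i] = 2 * dp[i - 1]
--
--             if s[i - 1] in last_occurrence:
--                 dp[i] -= dp[last_occurrence[s[i - 1]] - 1]
--
--             last_occurrence[s[i - 1]] = i
--
--         return dp[-1]
--
--     count_str1 = countDistinctSubsequences(str1)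
--     count_str2 = countDistinctSubsequences(str2)
--     if count_str1 >= count_str2:
--         return str1
--     else:
--         return str2
-- ===== SOURCE B (Python) =====
-- def betterString(str1, str2):
--     # Different DP: instead of A's position-indexed recurrence
--     # dp[i] = 2*dp[i-1] - dp[last[c]-1], count distinct subsequences by the
--     # number of distinct subsequences ENDING in each character: processing c
--     # sets end[c] = 1 + sum(end.values()), and the answer (with the empty
--     # subsequence) is 1 + sum(end.values()).
--     def count_distinct(s):
--         end = {}
--         for c in s:
--             end[c] = 1 + sum(end.values())
--         return 1 + sum(end.values())
--
--     c1 = count_distinct(str1)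
--     c2 = count_distinct(str2)
--     return str1 if c1 >= c2 else str2
-- ===== Notes on version B (the rewrite author's own statement) =====
-- stated objective: alternative
-- what changed: Replaces A's position-indexed dp-array recurrence (double the previous total, subtract dp at the character's previous position) with a different DP that keeps, per character, the number of distinct subsequences ending in that character (end[c] = 1 + sum of all ending counts) and returns 1 + their sum; no dp array and no last-occurrence indices exist.
import Mathlib
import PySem

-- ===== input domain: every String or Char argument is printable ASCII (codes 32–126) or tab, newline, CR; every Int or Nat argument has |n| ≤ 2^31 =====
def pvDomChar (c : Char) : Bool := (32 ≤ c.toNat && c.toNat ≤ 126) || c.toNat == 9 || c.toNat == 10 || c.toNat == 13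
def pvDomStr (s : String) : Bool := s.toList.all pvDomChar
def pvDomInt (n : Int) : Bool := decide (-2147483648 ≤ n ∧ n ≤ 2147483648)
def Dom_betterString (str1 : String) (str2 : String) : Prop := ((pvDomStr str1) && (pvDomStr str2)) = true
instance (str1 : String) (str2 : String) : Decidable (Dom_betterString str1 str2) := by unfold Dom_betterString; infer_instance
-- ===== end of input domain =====

-- B counts distinct subsequences by a different DP — per-character ending counts
-- (end[c] = 1 + sum of all ending counts) — instead of A's position-indexed dp array
-- with last-occurrence subtraction (objective: alternative).

-- ===== PORT A =====
-- one iteration of A's `for i in range(1, len(dp))`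
def pvStepA (s : String) (st : List Int × PySem.Dict Char Int) (i : Int) : List Int × PySem.Dict Char Int :=
  let dp := st.1
  let last := st.2
  -- s[i-1]; the index is always in range inside A's loop, so the default is never used
  let c := (PySem.Str.pyGet? s (i - 1)).getD ' '
  let v := 2 * PySem.List.pyGetD dp (i - 1) 0
  -- `if s[i-1] in last_occurrence: dp[i] -= dp[last_occurrence[s[i-1]] - 1]`
  let v := match last.get? c with
    | some j => v - PySem.List.pyGetD dp (j - 1) 0
    | none => v
  (PySem.List.pySetD dp i v, last.insert c i)

def pvCountA (s : String) : Int :=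
  let n := s.toList.length
  -- dp = [0] * (len(s) + 1); dp[0] = 1
  let dp := PySem.List.pySetD (List.replicate (n + 1) (0 : Int)) 0 1
  let r := (PySem.List.pyRange 1 ((n : Int) + 1) 1).foldl (pvStepA s) (dp, PySem.Dict.empty)
  PySem.List.pyGetD r.1 (-1) 0

def betterString (str1 : String) (str2 : String) : String :=
  if pvCountA str2 ≤ pvCountA str1 then str1 else str2

-- ===== PORT B =====
-- `end[c] = 1 + sum(end.values())`
def pvStepB (d : PySem.Dict Char Int) (c : Char) : PySem.Dict Char Int :=
  d.insert c (1 + d.values.sum)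

def pvCountB (s : String) : Int :=
  1 + (s.toList.foldl pvStepB PySem.Dict.empty).values.sum

def betterString_alt (str1 : String) (str2 : String) : String :=
  if pvCountB str2 ≤ pvCountB str1 then str1 else str2

-- ===== PRECONDITION & SPEC =====
def Spec_betterString (str1 : String) (str2 : String) (out : String) : Prop := out = betterString_alt str1 str2
instance (str1 : String) (str2 : String) (out : String) : Decidable (Spec_betterString str1 str2 out) := by unfold Spec_betterString; infer_instance

-- ===== CLAIM (what is proved, stated in full; the proofs are below) =====
def Claim_equal_betterString : Prop := ∀ (str1 : String) (str2 : String), Dom_betterString str1 str2 → Spec_betterString str1 str2 (betterString str1 str2)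

-- ===== LEMMAS AND PROOFS =====

lemma pvGetD_set_self {l : List Int} {i : Nat} (h : i < l.length) (a d : Int) :
    (l.set i a).getD i d = a := by
  simp [List.getD_eq_getElem?_getD, h]

lemma pvGetD_set_ne {l : List Int} {i j : Nat} (h : i ≠ j) (a d : Int) :
    (l.set i a).getD j d = l.getD j d := by
  simp [List.getD_eq_getElem?_getD, List.getElem?_set_ne h]

-- the A-side fold preserves the dp length
lemma pvLoopA_len (s : String) (is : List Int) :
    ∀ (st : List Int × PySem.Dict Char Int),
      ((is.foldl (pvStepA s) st).1).length = st.1.length := by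
  induction is with
  | nil => intro st; rfl
  | cons i is ih =>
      intro st
      rw [List.foldl_cons, ih]
      simp [pvStepA, PySem.List.length_pySetD]

-- summing a map where exactly one (nodup) element's value is replaced
lemma pvSumMapIf (l : List Char) (k : Char) (f : Char → Int) (v : Int)
    (hmem : k ∈ l) (hnd : l.Nodup) :
    (l.map (fun c => if c = k then v else f c)).sum = (l.map f).sum + v - f k := by
  induction l with
  | nil => cases hmem
  | cons a l ih =>
      rcases List.nodup_cons.mp hnd with ⟨hna, hndl⟩
      by_cases ha : a = k
      · subst ha
        have hmap : l.map (fun c => if c = a then v else f c) = l.map f :=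
          List.map_congr_left (fun c hc => if_neg (fun (hce : c = a) => hna (hce ▸ hc)))
        rw [List.map_cons, List.map_cons, List.sum_cons, List.sum_cons, if_pos rfl, hmap]
        ring
      · have hm : k ∈ l := by
          rcases List.mem_cons.mp hmem with h | h
          · exact absurd h.symm ha
          · exact h
        simp only [List.map_cons, List.sum_cons, if_neg ha, ih hm hndl]
        ring

-- how an insert changes the sum of a dict's values
lemma pvSumValuesInsert (d : PySem.Dict Char Int) (k : Char) (v : Int)
    (hnd : d.keys.Nodup) :
    (d.insert k v).values.sum = d.values.sum + v - d.getD k 0 := by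
  by_cases hc : d.contains k = true
  · have hkeys := PySem.Dict.keys_insert_of_contains d v hc
    have hnd' : (d.insert k v).keys.Nodup := hkeys ▸ hnd
    rw [PySem.Dict.values_eq_map_keys (d.insert k v) hnd' 0,
        PySem.Dict.values_eq_map_keys d hnd 0, hkeys]
    have hmap : d.keys.map (fun c => (d.insert k v).getD c 0)
        = d.keys.map (fun c => if c = k then v else d.getD c 0) := by
      apply List.map_congr_left
      intro c _
      rw [PySem.Dict.getD_insert]
    rw [hmap, pvSumMapIf d.keys k (fun c => d.getD c 0) v
      ((PySem.Dict.contains_iff_mem_keys d k).mp hc) hnd]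
  · have hc' : d.contains k = false := by
      cases h : d.contains k
      · rfl
      · exact absurd h hc
    have := PySem.Dict.items_insert_of_not_contains d v hc'
    have hvals : (d.insert k v).values = d.values ++ [v] := by
      show ((d.insert k v).items.map (·.2)) = (d.items.map (·.2)) ++ [v]
      rw [this]; simp
    rw [hvals, PySem.Dict.getD_of_not_contains d 0 hc']
    simp

-- loop invariant: A's dp at the number of processed characters equals 1 + the sum of
-- B's ending counts, and B's dict stores dp at (A's stored index − 1)
lemma pvLoop (s : String) (rest : List Char) :
    ∀ (pre : List Char) (dp : List Int) (lastA : PySem.Dict Char Int)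
      (endB : PySem.Dict Char Int),
      s.toList = pre ++ rest →
      dp.length = s.toList.length + 1 →
      dp.getD pre.length 0 = 1 + endB.values.sum →
      endB.keys.Nodup →
      (∀ c, (lastA.get? c).isSome = (endB.get? c).isSome) →
      (∀ c j, lastA.get? c = some j → 1 ≤ j ∧ j ≤ (pre.length : Int) ∧
          endB.get? c = some (dp.getD (j - 1).toNat 0)) →
      (((PySem.List.pyRange ((pre.length : Int) + 1) ((s.toList.length : Int) + 1) 1).foldl
          (pvStepA s) (dp, lastA)).1.getD s.toList.length 0)
        = 1 + (rest.foldl pvStepB endB).values.sum := by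
  induction rest with
  | nil =>
      intro pre dp lastA endB hsplit hlen hcnt hnd hsome hinv
      have hpre : pre.length = s.toList.length := by rw [hsplit]; simp
      rw [PySem.List.pyRange_one_eq_nil (by omega)]
      show dp.getD s.toList.length 0 = 1 + endB.values.sum
      rw [← hpre]; exact hcnt
  | cons c rest ih =>
      intro pre dp lastA endB hsplit hlen hcnt hnd hsome hinv
      have hn : pre.length < s.toList.length := by
        have h' : s.toList.length = pre.length + (c :: rest).length := by
          rw [hsplit, List.length_append]
        simp only [List.length_cons] at h'
        omega
      rw [PySem.List.pyRange_one_cons (by omega)]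
      rw [List.foldl_cons, List.foldl_cons]
      -- evaluate the A-step at index pre.length + 1
      have hchar : (PySem.Str.pyGet? s ((pre.length : Int) + 1 - 1)).getD ' ' = c := by
        have h1 : ((pre.length : Int) + 1 - 1) = ((pre.length : Nat) : Int) := by ring
        rw [h1, PySem.Str.pyGet?_natCast, hsplit]
        simp
      have hread : PySem.List.pyGetD dp ((pre.length : Int) + 1 - 1) 0 = 1 + endB.values.sum := by
        have h1 : ((pre.length : Int) + 1 - 1) = ((pre.length : Nat) : Int) := by ring
        rw [h1, PySem.List.pyGetD_natCast, hcnt]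
      have hcast : ((pre.length : Int) + 1) = (((pre.length + 1 : Nat)) : Int) := by push_cast; ring
      set S := endB.values.sum with hS
      have hstepA : pvStepA s (dp, lastA) ((pre.length : Int) + 1)
          = (dp.set (pre.length + 1)
               (match lastA.get? c with
                | some j => 2 * (1 + S) - PySem.List.pyGetD dp (j - 1) 0
                | none => 2 * (1 + S)),
             lastA.insert c (((pre.length + 1 : Nat)) : Int)) := by
        simp only [pvStepA]
        rw [hchar, hread, hcast, PySem.List.pySetD_natCast]
      have hstepB : pvStepB endB c = endB.insert c (1 + S) := rfl
      -- A's new dp entry equals 1 + the sum of B's new ending counts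
      have hsum' : (endB.insert c (1 + S)).values.sum = S + (1 + S) - endB.getD c 0 :=
        pvSumValuesInsert endB c (1 + S) hnd
      have hv : (match lastA.get? c with
            | some j => 2 * (1 + S) - PySem.List.pyGetD dp (j - 1) 0
            | none => 2 * (1 + S))
          = 1 + (endB.insert c (1 + S)).values.sum := by
        cases hA : lastA.get? c with
        | none =>
            have hs := hsome c
            rw [hA] at hs
            have hB : endB.get? c = none := by
              cases hB' : endB.get? c with
              | none => rfl
              | some v => rw [hB'] at hs; simp at hs
            rw [hsum', PySem.Dict.getD_of_get?_eq_none endB 0 hB]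
            ring
        | some j =>
            obtain ⟨h1, h2, hB⟩ := hinv c j hA
            have hj : PySem.List.pyGetD dp (j - 1) 0 = dp.getD (j - 1).toNat 0 := by
              have hb : (j - 1 : Int) < (dp.length : Int) := by rw [hlen]; push_cast; omega
              rw [PySem.List.pyGetD_eq_getElem dp 0 (by omega) hb]
              have hlt : (j - 1).toNat < dp.length := by omega
              rw [List.getD_eq_getElem?_getD, List.getElem?_eq_getElem hlt]
              rfl
            rw [hsum', PySem.Dict.getD_of_get?_eq_some endB 0 hB]
            show 2 * (1 + S) - PySem.List.pyGetD dp (j - 1) 0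
                = 1 + (S + (1 + S) - dp.getD (j - 1).toNat 0)
            rw [hj]
            ring
      rw [hstepA, hstepB]
      have hre : ((pre.length : Int) + 1 + 1) = (((pre ++ [c]).length : Int) + 1) := by
        simp only [List.length_append, List.length_cons, List.length_nil]
        push_cast
        ring
      rw [hre]
      -- apply the induction hypothesis with pre ++ [c]
      have happly := ih (pre ++ [c])
        (dp.set (pre.length + 1)
          (match lastA.get? c with
           | some j => 2 * (1 + S) - PySem.List.pyGetD dp (j - 1) 0
           | none => 2 * (1 + S)))
        (lastA.insert c (((pre.length + 1 : Nat)) : Int))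
        (endB.insert c (1 + S))
        (by rw [hsplit]; simp)
        (by simp [hlen])
        (by
          simp only [List.length_append, List.length_cons, List.length_nil]
          rw [pvGetD_set_self (by omega) _ 0]
          exact hv)
        (PySem.Dict.nodup_keys_insert endB c (1 + S) hnd)
        (by
          intro c'
          by_cases hc : c' = c <;>
            simp [PySem.Dict.get?_insert, hc, hsome c'])
        (by
          intro c' j hget
          by_cases hc : c' = c
          · subst hc
            rw [PySem.Dict.get?_insert, if_pos rfl] at hget
            injection hget with hj'
            subst hj'
            refine ⟨by push_cast; omega,
              by simp only [List.length_append, List.length_cons, List.length_nil]; push_cast; omega, ?_⟩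
            rw [PySem.Dict.get?_insert, if_pos rfl]
            congr 1
            have ht : ((((pre.length + 1 : Nat)) : Int) - 1).toNat = pre.length := by omega
            rw [ht, pvGetD_set_ne (by omega) _ 0]
            exact hcnt.symm
          · rw [PySem.Dict.get?_insert, if_neg hc] at hget
            obtain ⟨h1, h2, hB⟩ := hinv c' j hget
            refine ⟨h1,
              by simp only [List.length_append, List.length_cons, List.length_nil]; push_cast; omega, ?_⟩
            rw [PySem.Dict.get?_insert, if_neg hc, hB]
            congr 1
            rw [pvGetD_set_ne (by omega) _ 0])
      exact happly

lemma pvCount_eq (s : String) : pvCountA s = pvCountB s := by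
  simp only [pvCountA, pvCountB]
  rw [PySem.List.pySetD_of_nonneg]
  simp only [Int.toNat_zero]
  have hlen0 : ((List.replicate (s.toList.length + 1) (0 : Int)).set 0 1).length
      = s.toList.length + 1 := by simp
  have h := pvLoop s s.toList [] ((List.replicate (s.toList.length + 1) (0 : Int)).set 0 1)
    PySem.Dict.empty PySem.Dict.empty
    (by simp)
    hlen0
    (by
      simp only [List.length_nil]
      rw [pvGetD_set_self (by simp) 1 0]
      simp [PySem.Dict.empty])
    (by simp [PySem.Dict.empty])
    (by intro c; simp [PySem.Dict.get?_empty])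
    (by intro c j hg; simp [PySem.Dict.get?_empty] at hg)
  simp only [List.length_nil, Nat.cast_zero, zero_add] at h
  have hlenr := pvLoopA_len s (PySem.List.pyRange 1 ((s.toList.length : Int) + 1) 1)
    (((List.replicate (s.toList.length + 1) (0 : Int)).set 0 1), PySem.Dict.empty)
  set r := (PySem.List.pyRange 1 ((s.toList.length : Int) + 1) 1).foldl (pvStepA s)
    (((List.replicate (s.toList.length + 1) (0 : Int)).set 0 1), PySem.Dict.empty) with hr
  have hlenr' : r.1.length = s.toList.length + 1 := by
    rw [hlenr]; exact hlen0
  have hne : r.1 ≠ [] := by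
    intro hnil
    rw [hnil] at hlenr'
    simp at hlenr'
  rw [PySem.List.pyGetD_neg_one r.1 0 hne, List.getLast_eq_getElem, ← h]
  rw [List.getD_eq_getElem?_getD, List.getElem?_eq_getElem (by omega)]
  simp only [Option.getD_some]
  congr 1
  omega
  norm_num

-- ===== VERDICT (by name: the statement is the Claim_ definition above) =====
theorem betterString_spec : Claim_equal_betterString := by
  intro str1 str2 _
  show betterString str1 str2 = betterString_alt str1 str2
  simp only [betterString, betterString_alt, pvCount_eq]
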